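-- pv_equiv track=rewrite | github.com/TekiYu111/PIMNode_DSE | pimnode_dse/mapping/fusion_gene.py | _compute_reachability
-- ===== SOURCE A (Python) =====
-- from collections import defaultdict, deque
-- from typing import Dict, Iterable, List, Optional, Set, Tuple
--
-- def _compute_reachability(
--     op_names: Iterable[str],
--     edges: Iterable[Tuple[str, str]],
-- ) -> Dict[str, Set[str]]:
--     op_set = set(op_names)
--     graph: Dict[str, List[str]] = {op: [] for op in op_set}
--     for u, v in edges:
--         graph[u].append(v)
--
--     reach: Dict[str, Set[str]] = {}
--     for src in op_set:
--         vis = set()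
--         q = deque([src])
--         while q:
--             cur = q.popleft()
--             for nxt in graph[cur]:
--                 if nxt not in vis:
--                     vis.add(nxt)
--                     q.append(nxt)
--         vis.discard(src)
--         reach[src] = vis
--     return reach
-- ===== SOURCE B (Python) =====
-- from typing import Dict, Iterable, List, Set, Tuple
--
--
-- def _compute_reachability(
--     op_names: Iterable[str],
--     edges: Iterable[Tuple[str, str]],
-- ) -> Dict[str, Set[str]]:
--     op_set = set(op_names)
--     graph: Dict[str, List[str]] = {op: [] for op in op_set}
--     for u, v in edges:
--         graph[u].append(v)
--
--     # Round-based closure (dynamic programming, no per-source traversal):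
--     # after k rounds reach[u] holds exactly the nodes reachable from u by
--     # 1..k+1 edges; len(op_set) rounds suffice, since a shortest non-empty
--     # path repeats no node.
--     reach: Dict[str, Set[str]] = {u: set(graph[u]) for u in op_set}
--     for _ in range(len(op_set)):
--         reach = {
--             u: set(graph[u]).union(*(reach[v] for v in graph[u]))
--             for u in op_set
--         }
--     return {src: reach[src] - {src} for src in op_set}
-- ===== Notes on version B (the rewrite author's own statement) =====
-- stated objective: alternative
-- what changed: Per-source BFS with a visited-set and queue is replaced by a round-based dynamic-programming closure: reach starts as the direct-successor sets and |op_set| simultaneous rounds of reach[u] = graph[u] ∪ (U_{v in graph[u]} reach[v]) compute full reachability (a shortest non-empty path repeats no node), with no per-source traversal at all.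
import Mathlib
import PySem

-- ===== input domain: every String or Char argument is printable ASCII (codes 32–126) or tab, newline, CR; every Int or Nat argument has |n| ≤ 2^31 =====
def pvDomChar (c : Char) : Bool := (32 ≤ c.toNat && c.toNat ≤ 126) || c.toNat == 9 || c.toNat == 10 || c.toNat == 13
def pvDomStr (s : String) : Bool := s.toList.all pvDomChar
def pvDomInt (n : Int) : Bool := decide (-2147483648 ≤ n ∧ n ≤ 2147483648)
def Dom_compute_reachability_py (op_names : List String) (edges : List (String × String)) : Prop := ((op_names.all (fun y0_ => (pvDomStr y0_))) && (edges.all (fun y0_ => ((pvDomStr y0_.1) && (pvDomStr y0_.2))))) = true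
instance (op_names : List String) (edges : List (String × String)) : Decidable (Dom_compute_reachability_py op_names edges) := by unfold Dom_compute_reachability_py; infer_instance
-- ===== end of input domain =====

-- B replaces A's per-source BFS by a round-based dynamic-programming closure
-- (|op_set| simultaneous rounds of reach[u] = graph[u] ∪ ⋃_{v∈graph[u]} reach[v]);
-- objective: alternative, not faster. The Python function returns a dict of SETS,
-- whose iteration order PySem does not model: both ports emit each returned set in
-- sorted order (an order-insensitive canonical representative of the same set).

-- ===== PORT A =====
-- the inner statement `if nxt not in vis: vis.add(nxt); q.append(nxt)`
def pvStep (st : PySem.Set String × List String) (v : String) : PySem.Set String × List String :=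
  if v ∈ st.1 then st else (PySem.Set.add st.1 v, st.2 ++ [v])

-- A's `while q: cur = q.popleft(); for nxt in graph[cur]: …`; fuel only makes the
-- loop total (always sufficient inside Pre_); graph[cur] on a missing key raises
-- KeyError in Python — those inputs are outside Pre_, the port reads [] there.
def pvBfsA (g : PySem.Dict String (List String)) : Nat → PySem.Set String → List String → PySem.Set String
  | _, vis, [] => vis
  | 0, vis, _ :: _ => vis
  | f + 1, vis, cur :: rest =>
    let st := (g.getD cur []).foldl pvStep (vis, rest)
    pvBfsA g f st.1 st.2

def compute_reachability_py (op_names : List String) (edges : List (String × String)) : List (String × List String) :=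
  let opSet := PySem.Set.ofList op_names
  -- graph = {op: [] for op in op_set}; graph[u].append(v) (KeyError on missing u: outside Pre_, modify then creates the key)
  let graph0 : PySem.Dict String (List String) := opSet.foldl (fun d op => d.insert op []) PySem.Dict.empty
  let graph := edges.foldl (fun d e => d.modify e.1 [] (· ++ [e.2])) graph0
  let fuel := op_names.length + edges.length + 1
  let reach := opSet.foldl
    (fun (r : PySem.Dict String (List String)) src =>
      r.insert src (PySem.List.sorted (PySem.Set.discard (pvBfsA graph fuel PySem.Set.empty [src]) src) (fun x => x) false))
    PySem.Dict.empty
  reach.items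

-- ===== PORT B =====
-- one round: reach = {u: set(graph[u]).union(*(reach[v] for v in graph[u])) for u in op_set}
-- (reach[v] on a key outside op_set raises KeyError in Python: outside Pre_, the port reads ∅)
def pvReachRound (g : PySem.Dict String (List String)) (ops : List String)
    (reach : PySem.Dict String (PySem.Set String)) : PySem.Dict String (PySem.Set String) :=
  ops.foldl
    (fun r u =>
      r.insert u ((g.getD u []).foldl (fun s v => PySem.Set.union s (reach.getD v PySem.Set.empty))
        (PySem.Set.ofList (g.getD u []))))
    PySem.Dict.empty

-- `for _ in range(n): reach = {…}`
def pvIterRounds (g : PySem.Dict String (List String)) (ops : List String) :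
    Nat → PySem.Dict String (PySem.Set String) → PySem.Dict String (PySem.Set String)
  | 0, r => r
  | k + 1, r => pvReachRound g ops (pvIterRounds g ops k r)

def compute_reachability_py_alt (op_names : List String) (edges : List (String × String)) : List (String × List String) :=
  let opSet := PySem.Set.ofList op_names
  -- graph = {op: [] for op in op_set}; graph[u].append(v) (KeyError on missing u: outside Pre_, modify then creates the key)
  let graph0 : PySem.Dict String (List String) := opSet.foldl (fun d op => d.insert op []) PySem.Dict.empty
  let graph := edges.foldl (fun d e => d.modify e.1 [] (· ++ [e.2])) graph0
  -- reach = {u: set(graph[u]) for u in op_set}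
  let reach0 : PySem.Dict String (PySem.Set String) :=
    opSet.foldl (fun r u => r.insert u (PySem.Set.ofList (graph.getD u []))) PySem.Dict.empty
  let reachN := pvIterRounds graph opSet opSet.length reach0
  -- return {src: reach[src] - {src} for src in op_set}
  let out := opSet.foldl
    (fun (r : PySem.Dict String (List String)) src =>
      r.insert src (PySem.List.sorted (PySem.Set.diff (reachN.getD src PySem.Set.empty) [src]) (fun x => x) false))
    PySem.Dict.empty
  out.items

-- ===== PRECONDITION & SPEC =====
-- Pre_ excludes exactly the inputs where Python A raises KeyError: an edge endpoint
-- absent from op_names (source: at graph construction; target: when BFS pops it).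
def Pre_compute_reachability_py (op_names : List String) (edges : List (String × String)) : Prop :=
  ∀ e ∈ edges, e.1 ∈ op_names ∧ e.2 ∈ op_names
instance (op_names : List String) (edges : List (String × String)) : Decidable (Pre_compute_reachability_py op_names edges) := by unfold Pre_compute_reachability_py; infer_instance

def pvWitness_compute_reachability_py : List String × (List (String × String)) :=
  (["a", "b", "c"], [("a", "b"), ("b", "a"), ("b", "c")])

def Spec_compute_reachability_py (op_names : List String) (edges : List (String × String)) (out : List (String × List String)) : Prop := out = compute_reachability_py_alt op_names edges
instance (op_names : List String) (edges : List (String × String)) (out : List (String × List String)) : Decidable (Spec_compute_reachability_py op_names edges out) := by unfold Spec_compute_reachability_py; infer_instance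

-- ===== CLAIM (what is proved, stated in full; the proofs are below) =====
def Claim_equal_compute_reachability_py : Prop := ∀ (op_names : List String) (edges : List (String × String)), Dom_compute_reachability_py op_names edges → Pre_compute_reachability_py op_names edges → Spec_compute_reachability_py op_names edges (compute_reachability_py op_names edges)

-- ===== LEMMAS AND PROOFS =====

-- ---- paths: pvPath g u x k = "there is a walk u → x of between 1 and k edges" ----
def pvPath (g : PySem.Dict String (List String)) (u x : String) : Nat → Prop
  | 0 => False
  | k + 1 => x ∈ g.getD u [] ∨ ∃ v ∈ g.getD u [], pvPath g v x k

def pvReach (g : PySem.Dict String (List String)) (u x : String) : Prop := ∃ k, pvPath g u x k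

theorem pvPath_snoc (g : PySem.Dict String (List String)) :
    ∀ (k : Nat) (u c x : String), pvPath g u c k → x ∈ g.getD c [] → pvPath g u x (k + 1) := by
  intro k
  induction k with
  | zero => intro u c x h; exact absurd h (by simp [pvPath])
  | succ m ih =>
    intro u c x h hx
    rcases h with h | ⟨v, hv, hp⟩
    · exact Or.inr ⟨c, h, Or.inl hx⟩
    · exact Or.inr ⟨v, hv, ih v c x hp hx⟩

-- ---- the two BFS unfoldings ----
theorem pvBfsA_nil (g : PySem.Dict String (List String)) (f : Nat) (vis : PySem.Set String) :
    pvBfsA g f vis [] = vis := by cases f <;> rfl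

theorem pvBfsA_cons (g : PySem.Dict String (List String)) (f : Nat) (vis : PySem.Set String)
    (cur : String) (rest : List String) :
    pvBfsA g (f + 1) vis (cur :: rest)
      = pvBfsA g f ((g.getD cur []).foldl pvStep (vis, rest)).1 ((g.getD cur []).foldl pvStep (vis, rest)).2 := rfl

-- the new elements contributed by scanning one successor list against vis
def pvAdds : List String → List String → List String
  | [], _ => []
  | v :: succ, vis => if v ∈ vis then pvAdds succ vis else v :: pvAdds succ (vis ++ [v])

theorem pvAdds_spec (succ : List String) : ∀ (vis q : List String),
    succ.foldl pvStep (vis, q) = (vis ++ pvAdds succ vis, q ++ pvAdds succ vis) := by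
  induction succ with
  | nil => intro vis q; simp [pvAdds]
  | cons v succ ih =>
    intro vis q
    by_cases h : v ∈ vis
    · simp [pvAdds, pvStep, h, ih]
    · simp only [List.foldl_cons, pvStep, h, pvAdds,
        PySem.Set.add_of_not_mem h, ih]
      simp

theorem pvAdds_subset (succ : List String) : ∀ (vis : List String), ∀ y ∈ pvAdds succ vis, y ∈ succ := by
  induction succ with
  | nil => intro vis y hy; exact absurd hy (by simp [pvAdds])
  | cons v succ ih =>
    intro vis y hy
    by_cases h : v ∈ vis
    · simp only [pvAdds, if_pos h] at hy
      exact List.mem_cons_of_mem _ (ih vis y hy)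
    · simp only [pvAdds, if_neg h, List.mem_cons] at hy
      rcases hy with rfl | hy
      · exact List.mem_cons_self
      · exact List.mem_cons_of_mem _ (ih (vis ++ [v]) y hy)

theorem mem_append_pvAdds (succ : List String) : ∀ (vis : List String), ∀ v ∈ succ, v ∈ vis ++ pvAdds succ vis := by
  induction succ with
  | nil => intro vis v hv; cases hv
  | cons w succ ih =>
    intro vis v hv
    by_cases h : w ∈ vis
    · simp only [pvAdds, if_pos h]
      rcases List.mem_cons.mp hv with rfl | hv
      · exact List.mem_append_left _ h
      · exact ih vis v hv
    · simp only [pvAdds, if_neg h]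
      rcases List.mem_cons.mp hv with rfl | hv
      · simp
      · have := ih (vis ++ [w]) v hv
        simp only [List.mem_append, List.mem_cons] at this ⊢
        tauto

theorem nodup_append_pvAdds (succ : List String) : ∀ (vis : List String), vis.Nodup →
    (vis ++ pvAdds succ vis).Nodup := by
  induction succ with
  | nil => intro vis h; simpa [pvAdds]
  | cons v succ ih =>
    intro vis h
    by_cases hv : v ∈ vis
    · simpa [pvAdds, hv] using ih vis h
    · have h' : (vis ++ [v]).Nodup := by
        simp only [List.nodup_append]
        refine ⟨h, List.nodup_singleton v, ?_⟩
        intro a ha b hb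
        simp only [List.mem_singleton] at hb
        subst hb
        exact fun hEq => hv (hEq ▸ ha)
      have := ih (vis ++ [v]) h'
      simpa [pvAdds, hv] using this

-- counting: new elements consume "fresh" budget
def pvFresh (U vis : List String) : Nat := (U.filter (fun x => decide (x ∉ vis))).length

theorem pvFresh_dec (U vis : List String) (v : String) (hU : v ∈ U) (hv : v ∉ vis) :
    pvFresh U (vis ++ [v]) + 1 ≤ pvFresh U vis := by
  have hsub : List.Sublist (U.filter (fun x => decide (x ∉ vis ++ [v]))) (U.filter (fun x => decide (x ∉ vis))) := by
    apply List.monotone_filter_right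
    intro a ha; simp_all
  have hle := hsub.length_le
  rcases Nat.lt_or_ge (U.filter (fun x => decide (x ∉ vis ++ [v]))).length (U.filter (fun x => decide (x ∉ vis))).length with h | h
  · unfold pvFresh; omega
  · exfalso
    have heq := hsub.eq_of_length (le_antisymm hle h)
    have h1 : v ∈ U.filter (fun x => decide (x ∉ vis)) := by simp [hU, hv]
    rw [← heq] at h1
    simp at h1

theorem pvAdds_count (U : List String) (succ : List String) (hsucc : ∀ x ∈ succ, x ∈ U) :
    ∀ vis, pvFresh U (vis ++ pvAdds succ vis) + (pvAdds succ vis).length ≤ pvFresh U vis := by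
  induction succ with
  | nil => intro vis; simp [pvAdds]
  | cons v succ ih =>
    intro vis
    by_cases h : v ∈ vis
    · simpa [pvAdds, h] using ih (fun x hx => hsucc x (List.mem_cons_of_mem _ hx)) vis
    · have hdec := pvFresh_dec U vis v (hsucc v (by simp)) h
      have hih := ih (fun x hx => hsucc x (List.mem_cons_of_mem _ hx)) (vis ++ [v])
      simp only [pvAdds, if_neg h, List.length_cons]
      have hassoc : vis ++ v :: pvAdds succ (vis ++ [v]) = (vis ++ [v]) ++ pvAdds succ (vis ++ [v]) := by simp
      rw [hassoc]
      omega

-- ---- BFS: soundness, closedness, nodup ----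
theorem pvBfsA_sound (g : PySem.Dict String (List String)) (src : String) :
    ∀ (f : Nat) (vis q : List String),
      (∀ y ∈ vis, pvReach g src y) → (∀ y ∈ q, y = src ∨ pvReach g src y) →
      ∀ x ∈ pvBfsA g f vis q, pvReach g src x := by
  intro f
  induction f with
  | zero =>
    intro vis q hvis hq x hx
    cases q with
    | nil => exact hvis x (by simpa [pvBfsA_nil] using hx)
    | cons c r => exact hvis x (by simpa [pvBfsA] using hx)
  | succ m ih =>
    intro vis q hvis hq x hx
    cases q with
    | nil => exact hvis x (by simpa [pvBfsA_nil] using hx)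
    | cons cur rest =>
      rw [pvBfsA_cons, pvAdds_spec] at hx
      have hcur := hq cur (by simp)
      have hadds : ∀ y ∈ pvAdds (g.getD cur []) vis, pvReach g src y := by
        intro y hy
        have hsy : y ∈ g.getD cur [] := pvAdds_subset _ _ y hy
        rcases hcur with rfl | ⟨k, hk⟩
        · exact ⟨1, Or.inl hsy⟩
        · exact ⟨k + 1, pvPath_snoc g k src cur y hk hsy⟩
      apply ih (vis ++ pvAdds (g.getD cur []) vis) (rest ++ pvAdds (g.getD cur []) vis)
      · intro y hy
        rcases List.mem_append.mp hy with hy | hy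
        · exact hvis y hy
        · exact hadds y hy
      · intro y hy
        rcases List.mem_append.mp hy with hy | hy
        · exact hq y (List.mem_cons_of_mem _ hy)
        · exact Or.inr (hadds y hy)
      · exact hx

theorem pvBfsA_nodup (g : PySem.Dict String (List String)) :
    ∀ (f : Nat) (vis q : List String), vis.Nodup → (pvBfsA g f vis q).Nodup := by
  intro f
  induction f with
  | zero =>
    intro vis q h
    cases q with
    | nil => simpa [pvBfsA_nil]
    | cons c r => simpa [pvBfsA]
  | succ m ih =>
    intro vis q h
    cases q with
    | nil => simpa [pvBfsA_nil]
    | cons cur rest =>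
      rw [pvBfsA_cons, pvAdds_spec]
      exact ih _ _ (nodup_append_pvAdds _ _ h)

-- master closure lemma: with enough fuel the BFS result absorbs all successors
theorem pvBfsA_closed (U : List String) (g : PySem.Dict String (List String))
    (hg : ∀ u, ∀ x ∈ g.getD u [], x ∈ U) :
    ∀ (n f : Nat) (vis q : List String),
    q.length + pvFresh U vis ≤ n → q.length + pvFresh U vis ≤ f →
    (∀ y ∈ vis, y ∈ q ∨ ∀ z ∈ g.getD y [], z ∈ vis) →
    (∀ y ∈ vis, y ∈ pvBfsA g f vis q)
    ∧ (∀ y, (y ∈ vis ∨ y ∈ q) → ∀ z ∈ g.getD y [], z ∈ pvBfsA g f vis q)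
    ∧ (∀ y ∈ pvBfsA g f vis q, ∀ z ∈ g.getD y [], z ∈ pvBfsA g f vis q) := by
  intro n
  induction n with
  | zero =>
    intro f vis q hn _ J
    have hq : q = [] := by cases q <;> simp_all
    subst hq
    simp only [pvBfsA_nil]
    refine ⟨fun y hy => hy, ?_, ?_⟩
    · intro y hy z hz
      rcases hy with hy | hy
      · rcases J y hy with h | h
        · cases h
        · exact h z hz
      · cases hy
    · intro y hy z hz
      rcases J y hy with h | h
      · cases h
      · exact h z hz
  | succ m ih =>
    intro f vis q hn hf J
    cases q with
    | nil =>
      simp only [pvBfsA_nil]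
      refine ⟨fun y hy => hy, ?_, ?_⟩
      · intro y hy z hz
        rcases hy with hy | hy
        · rcases J y hy with h | h
          · cases h
          · exact h z hz
        · cases hy
      · intro y hy z hz
        rcases J y hy with h | h
        · cases h
        · exact h z hz
    | cons cur rest =>
      obtain ⟨a, rfl⟩ : ∃ a, f = a + 1 := ⟨f - 1, by simp only [List.length_cons] at hf; omega⟩
      simp only [pvBfsA_cons, pvAdds_spec]
      have hcnt := pvAdds_count U (g.getD cur []) (hg cur) vis
      simp only [List.length_cons] at hn hf
      have hm : (rest ++ pvAdds (g.getD cur []) vis).length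
          + pvFresh U (vis ++ pvAdds (g.getD cur []) vis) ≤ m := by
        simp only [List.length_append]; omega
      have ha : (rest ++ pvAdds (g.getD cur []) vis).length
          + pvFresh U (vis ++ pvAdds (g.getD cur []) vis) ≤ a := by
        simp only [List.length_append]; omega
      have J' : ∀ y ∈ vis ++ pvAdds (g.getD cur []) vis,
          y ∈ rest ++ pvAdds (g.getD cur []) vis
          ∨ ∀ z ∈ g.getD y [], z ∈ vis ++ pvAdds (g.getD cur []) vis := by
        intro y hy
        rcases List.mem_append.mp hy with hy | hy
        · rcases J y hy with h | h
          · rcases List.mem_cons.mp h with rfl | h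
            · exact Or.inr (fun z hz => mem_append_pvAdds _ vis z hz)
            · exact Or.inl (List.mem_append_left _ h)
          · exact Or.inr (fun z hz => List.mem_append_left _ (h z hz))
        · exact Or.inl (List.mem_append_right _ hy)
      obtain ⟨ih1, ih2, ih3⟩ := ih a (vis ++ pvAdds (g.getD cur []) vis)
        (rest ++ pvAdds (g.getD cur []) vis) hm ha J'
      refine ⟨?_, ?_, ih3⟩
      · intro y hy
        exact ih1 y (List.mem_append_left _ hy)
      · intro y hy z hz
        rcases hy with hy | hy
        · exact ih2 y (Or.inl (List.mem_append_left _ hy)) z hz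
        · rcases List.mem_cons.mp hy with rfl | hy
          · exact ih1 z (mem_append_pvAdds _ vis z hz)
          · exact ih2 y (Or.inr (List.mem_append_left _ hy)) z hz

-- ---- dict-of-fresh-key folds read back pointwise ----
theorem getD_foldl_insert_not_mem {β : Type} (l : List String) (f : String → β)
    (d : PySem.Dict String β) (u : String) (dflt : β) :
    u ∉ l → (l.foldl (fun r x => r.insert x (f x)) d).getD u dflt = d.getD u dflt := by
  induction l generalizing d with
  | nil => intro _; rfl
  | cons x t ih =>
    intro hu
    simp only [List.foldl_cons]
    rw [ih _ (fun h => hu (List.mem_cons_of_mem _ h))]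
    exact PySem.Dict.getD_insert_of_ne _ _ _ (fun h => hu (by simp [h]))

theorem getD_foldl_insert_mem {β : Type} (l : List String) (f : String → β)
    (d : PySem.Dict String β) (u : String) (dflt : β) :
    u ∈ l → l.Nodup → (l.foldl (fun r x => r.insert x (f x)) d).getD u dflt = f u := by
  induction l generalizing d with
  | nil => intro hu _; cases hu
  | cons x t ih =>
    intro hu hnd
    simp only [List.foldl_cons]
    rcases List.mem_cons.mp hu with rfl | hu'
    · rw [getD_foldl_insert_not_mem t f _ u dflt (by simp at hnd; exact hnd.1)]
      exact PySem.Dict.getD_insert_self _ _ _ _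
    · exact ih _ hu' (by simp at hnd; exact hnd.2)

-- ---- the adjacency dict: successors are exactly the targets of edges out of u ----
theorem pvSucc_eq (op_names : List String) (edges : List (String × String)) (u : String) :
    ((edges.foldl (fun d e => d.modify e.1 [] (· ++ [e.2]))
        ((PySem.Set.ofList op_names).foldl (fun d op => d.insert op []) PySem.Dict.empty)).getD u [])
      = (edges.filter (fun p => p.1 == u)).map Prod.snd := by
  rw [PySem.Dict.getD_foldl_modify_append]
  have h0 : ∀ (ops : List String) (d : PySem.Dict String (List String)), (∀ c, d.getD c [] = []) →
      ∀ c, (ops.foldl (fun d op => d.insert op ([] : List String)) d).getD c [] = [] := by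
    intro ops
    induction ops with
    | nil => intro d hd c; exact hd c
    | cons op ops ih =>
      intro d hd c
      simp only [List.foldl_cons]
      apply ih
      intro c'
      rw [PySem.Dict.getD_insert]
      split <;> simp [hd]
  rw [h0 (PySem.Set.ofList op_names) PySem.Dict.empty (fun c => by simp) u]
  simp

-- ---- membership / nodup of the union fold in one DP round ----
theorem mem_foldl_union (h : String → PySem.Set String) (x : String) :
    ∀ (l : List String) (s0 : PySem.Set String), s0.Nodup →
    (x ∈ l.foldl (fun s v => PySem.Set.union s (h v)) s0 ↔ x ∈ s0 ∨ ∃ v ∈ l, x ∈ h v) := by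
  intro l
  induction l with
  | nil => intro s0 _; simp
  | cons v t ih =>
    intro s0 hs0
    simp only [List.foldl_cons]
    rw [ih _ (PySem.Set.nodup_union _ _ hs0)]
    simp only [PySem.Set.mem_union]
    constructor
    · rintro ((h1 | h1) | ⟨w, hw, hx⟩)
      · exact Or.inl h1
      · exact Or.inr ⟨v, by simp, h1⟩
      · exact Or.inr ⟨w, List.mem_cons_of_mem _ hw, hx⟩
    · rintro (h1 | ⟨w, hw, hx⟩)
      · exact Or.inl (Or.inl h1)
      · rcases List.mem_cons.mp hw with rfl | hw
        · exact Or.inl (Or.inr hx)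
        · exact Or.inr ⟨w, hw, hx⟩

theorem nodup_foldl_union (h : String → PySem.Set String) :
    ∀ (l : List String) (s0 : PySem.Set String), s0.Nodup →
    (l.foldl (fun s v => PySem.Set.union s (h v)) s0).Nodup := by
  intro l
  induction l with
  | nil => intro s0 hs0; exact hs0
  | cons v t ih => intro s0 hs0; exact ih _ (PySem.Set.nodup_union _ _ hs0)

-- ---- DP characterization ----
theorem pvIter_mem (g : PySem.Dict String (List String)) (ops : List String)
    (hnd : ops.Nodup) (hsub : ∀ u, ∀ v ∈ g.getD u [], v ∈ ops) :
    ∀ (k : Nat) (u : String), u ∈ ops → ∀ x,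
    (x ∈ (pvIterRounds g ops k
          (ops.foldl (fun r u => r.insert u (PySem.Set.ofList (g.getD u []))) PySem.Dict.empty)).getD u PySem.Set.empty
      ↔ pvPath g u x (k + 1)) := by
  intro k
  induction k with
  | zero =>
    intro u hu x
    simp only [pvIterRounds]
    rw [getD_foldl_insert_mem ops _ _ u _ hu hnd, PySem.Set.mem_ofList]
    simp [pvPath]
  | succ m ih =>
    intro u hu x
    simp only [pvIterRounds, pvReachRound]
    rw [getD_foldl_insert_mem ops _ _ u _ hu hnd]
    rw [mem_foldl_union _ _ _ _ (PySem.Set.nodup_ofList _)]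
    simp only [PySem.Set.mem_ofList]
    constructor
    · rintro (h1 | ⟨v, hv, hx⟩)
      · exact Or.inl h1
      · exact Or.inr ⟨v, hv, (ih v (hsub u v hv) x).mp hx⟩
    · rintro (h1 | ⟨v, hv, hx⟩)
      · exact Or.inl h1
      · exact Or.inr ⟨v, hv, (ih v (hsub u v hv) x).mpr hx⟩

theorem pvIter_nodup (g : PySem.Dict String (List String)) (ops : List String)
    (hnd : ops.Nodup) :
    ∀ (k : Nat) (u : String), u ∈ ops →
    ((pvIterRounds g ops k
        (ops.foldl (fun r u => r.insert u (PySem.Set.ofList (g.getD u []))) PySem.Dict.empty)).getD u PySem.Set.empty).Nodup := by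
  intro k
  cases k with
  | zero =>
    intro u hu
    simp only [pvIterRounds]
    rw [getD_foldl_insert_mem ops _ _ u _ hu hnd]
    exact PySem.Set.nodup_ofList _
  | succ m =>
    intro u hu
    simp only [pvIterRounds, pvReachRound]
    rw [getD_foldl_insert_mem ops _ _ u _ hu hnd]
    exact nodup_foldl_union _ _ _ (PySem.Set.nodup_ofList _)

-- ---- chains: bounding walk length by pigeonhole ----
def pvChain (g : PySem.Dict String (List String)) : String → List String → Prop
  | _, [] => True
  | u, v :: l => v ∈ g.getD u [] ∧ pvChain g v l

theorem pvChain_split (g : PySem.Dict String (List String)) (y : String) :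
    ∀ (a : List String) (u : String) (c : List String),
    pvChain g u (a ++ y :: c) ↔ pvChain g u (a ++ [y]) ∧ pvChain g y c := by
  intro a
  induction a with
  | nil => intro u c; simp only [List.nil_append, pvChain, and_true]
  | cons w t ih =>
    intro u c
    simp only [List.cons_append, pvChain]
    rw [ih w c]
    tauto

theorem pvPath_iff_chain (g : PySem.Dict String (List String)) :
    ∀ (k : Nat) (u x : String), pvPath g u x k ↔ ∃ l, pvChain g u (l ++ [x]) ∧ l.length + 1 ≤ k := by
  intro k
  induction k with
  | zero =>
    intro u x
    constructor
    · intro h; exact absurd h (by simp [pvPath])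
    · rintro ⟨l, _, hl⟩; omega
  | succ m ih =>
    intro u x
    constructor
    · rintro (h | ⟨v, hv, hp⟩)
      · exact ⟨[], ⟨h, trivial⟩, by simp⟩
      · rcases (ih v x).mp hp with ⟨l, hc, hl⟩
        exact ⟨v :: l, ⟨hv, hc⟩, by simp only [List.length_cons]; omega⟩
    · rintro ⟨l, hc, hl⟩
      cases l with
      | nil => exact Or.inl hc.1
      | cons v t =>
        exact Or.inr ⟨v, hc.1, (ih v x).mpr ⟨t, hc.2, by simp only [List.length_cons] at hl; omega⟩⟩

theorem pvChain_mem (g : PySem.Dict String (List String)) :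
    ∀ (m : List String) (u : String), pvChain g u m → ∀ y ∈ m, ∃ p, y ∈ g.getD p [] := by
  intro m
  induction m with
  | nil => intro u _ y hy; cases hy
  | cons v t ih =>
    intro u ⟨hv, hc⟩ y hy
    rcases List.mem_cons.mp hy with rfl | hy
    · exact ⟨u, hv⟩
    · exact ih v hc y hy

theorem not_nodup_split (m : List String) (h : ¬ m.Nodup) :
    ∃ a y b c, m = a ++ y :: (b ++ y :: c) := by
  induction m with
  | nil => exact absurd List.nodup_nil h
  | cons z t ih =>
    by_cases hz : z ∈ t
    · rcases List.append_of_mem hz with ⟨b, c, rfl⟩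
      exact ⟨[], z, b, c, rfl⟩
    · have ht : ¬ t.Nodup := fun hn => h (List.nodup_cons.mpr ⟨hz, hn⟩)
      rcases ih ht with ⟨a, y, b, c, rfl⟩
      exact ⟨z :: a, y, b, c, rfl⟩

theorem pvChain_shorten_aux (g : PySem.Dict String (List String)) (x : String) :
    ∀ (n : Nat) (l : List String), l.length ≤ n → ∀ (u : String), pvChain g u (l ++ [x]) →
    ∃ l', pvChain g u (l' ++ [x]) ∧ (l' ++ [x]).Nodup := by
  intro n
  induction n with
  | zero =>
    intro l hl u hc
    have : l = [] := List.length_eq_zero_iff.mp (Nat.le_zero.mp hl)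
    subst this
    exact ⟨[], hc, by simp⟩
  | succ m ih =>
    intro l hl u hc
    by_cases hnd : (l ++ [x]).Nodup
    · exact ⟨l, hc, hnd⟩
    · rcases not_nodup_split _ hnd with ⟨a, y, b, c, heq⟩
      rcases List.eq_nil_or_concat c with rfl | ⟨c', z, rfl⟩
      · -- l ++ [x] = a ++ y :: (b ++ [y]) : the last element y must be x
        have h2 : l ++ [x] = (a ++ y :: b) ++ [y] := by simpa using heq
        have hx : x = y := by
          have h3 := congrArg List.getLast? h2
          simp only [List.getLast?_concat] at h3
          exact Option.some.inj h3
        subst hx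
        have hla : l = a ++ x :: b := by
          have := h2
          rwa [List.append_cancel_right_eq] at this
        have hc' : pvChain g u (a ++ x :: (b ++ [x])) := by
          rw [heq] at hc; exact hc
        have hc1 := ((pvChain_split g x a u (b ++ [x])).mp hc').1
        apply ih a _ u hc1
        have : l.length = a.length + b.length + 1 := by simp [hla]; omega
        omega
      · -- l ++ [x] = a ++ y :: (b ++ y :: (c' ++ [z])) : the last element z must be x
        have h2 : l ++ [x] = (a ++ y :: (b ++ y :: c')) ++ [z] := by simpa using heq
        have hx : x = z := by
          have h3 := congrArg List.getLast? h2
          simp only [List.getLast?_concat] at h3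
          exact Option.some.inj h3
        subst hx
        have hla : l = a ++ y :: (b ++ y :: c') := by
          have := h2
          rwa [List.append_cancel_right_eq] at this
        have hc' : pvChain g u (a ++ y :: (b ++ y :: (c' ++ [x]))) := by
          rw [heq] at hc; simpa [List.concat_eq_append] using hc
        have hsp := (pvChain_split g y a u (b ++ y :: (c' ++ [x]))).mp hc'
        have hc3 := ((pvChain_split g y b y (c' ++ [x])).mp hsp.2).2
        have hcomb : pvChain g u (a ++ y :: (c' ++ [x])) :=
          (pvChain_split g y a u (c' ++ [x])).mpr ⟨hsp.1, hc3⟩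
        have hcomb' : pvChain g u ((a ++ y :: c') ++ [x]) := by
          simpa using hcomb
        apply ih (a ++ y :: c') _ u hcomb'
        have : l.length = a.length + b.length + c'.length + 2 := by simp [hla]; omega
        simp only [List.length_append, List.length_cons]
        omega

theorem pvChain_shorten (g : PySem.Dict String (List String)) (x : String)
    (l : List String) (u : String) (hc : pvChain g u (l ++ [x])) :
    ∃ l', pvChain g u (l' ++ [x]) ∧ (l' ++ [x]).Nodup :=
  pvChain_shorten_aux g x l.length l le_rfl u hc

theorem pvReach_bound (g : PySem.Dict String (List String)) (ops : List String)
    (hsub : ∀ u, ∀ v ∈ g.getD u [], v ∈ ops)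
    (u x : String) (h : pvReach g u x) : pvPath g u x (ops.length + 1) := by
  rcases h with ⟨k, hk⟩
  rcases (pvPath_iff_chain g k u x).mp hk with ⟨l, hc, _⟩
  rcases pvChain_shorten g x l u hc with ⟨l', hc', hnd'⟩
  have hmem : ∀ y ∈ l' ++ [x], y ∈ ops := by
    intro y hy
    rcases pvChain_mem g (l' ++ [x]) u hc' y hy with ⟨p, hp⟩
    exact hsub p y hp
  have hlen : (l' ++ [x]).length ≤ ops.length :=
    (List.subperm_of_subset hnd' hmem).length_le
  apply (pvPath_iff_chain g (ops.length + 1) u x).mpr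
  exact ⟨l', hc', by simp at hlen; omega⟩

-- ===== VERDICT helper: per-source equality =====
theorem pvFresh_empty_le (U : List String) : pvFresh U [] ≤ U.length := by
  unfold pvFresh
  exact List.length_filter_le _ _

theorem pvPerSrc (op_names : List String) (edges : List (String × String))
    (hpre : Pre_compute_reachability_py op_names edges) (src : String)
    (hsrc : src ∈ PySem.Set.ofList op_names) :
    PySem.List.sorted
      (PySem.Set.discard
        (pvBfsA (edges.foldl (fun d e => d.modify e.1 [] (· ++ [e.2]))
            ((PySem.Set.ofList op_names).foldl (fun d op => d.insert op []) PySem.Dict.empty))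
          (op_names.length + edges.length + 1) PySem.Set.empty [src]) src) (fun x => x) false
    = PySem.List.sorted
      (PySem.Set.diff
        ((pvIterRounds (edges.foldl (fun d e => d.modify e.1 [] (· ++ [e.2]))
              ((PySem.Set.ofList op_names).foldl (fun d op => d.insert op []) PySem.Dict.empty))
            (PySem.Set.ofList op_names) (PySem.Set.ofList op_names).length
            ((PySem.Set.ofList op_names).foldl
              (fun r u => r.insert u (PySem.Set.ofList
                ((edges.foldl (fun d e => d.modify e.1 [] (· ++ [e.2]))
                    ((PySem.Set.ofList op_names).foldl (fun d op => d.insert op []) PySem.Dict.empty)).getD u [])))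
              PySem.Dict.empty)).getD src PySem.Set.empty) [src]) (fun x => x) false := by
  set ops := PySem.Set.ofList op_names with hops_def
  set g := edges.foldl (fun d e => d.modify e.1 [] (· ++ [e.2]))
      (ops.foldl (fun d op => d.insert op []) PySem.Dict.empty) with hg_def
  set U := edges.map Prod.snd with hU_def
  have hsucc : ∀ u : String, g.getD u [] = (edges.filter (fun p => p.1 == u)).map Prod.snd := by
    intro u; exact pvSucc_eq op_names edges u
  have hU : ∀ u : String, ∀ z ∈ g.getD u [], z ∈ U := by
    intro u z hz
    rw [hsucc u] at hz
    rcases List.mem_map.mp hz with ⟨p, hp, rfl⟩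
    exact List.mem_map.mpr ⟨p, List.mem_of_mem_filter hp, rfl⟩
  have hops : ∀ u : String, ∀ z ∈ g.getD u [], z ∈ ops := by
    intro u z hz
    rw [hsucc u] at hz
    rcases List.mem_map.mp hz with ⟨p, hp, rfl⟩
    exact (PySem.Set.mem_ofList _ _).mpr (hpre p (List.mem_of_mem_filter hp)).2
  have hfuel : 1 + pvFresh U [] ≤ op_names.length + edges.length + 1 := by
    have := pvFresh_empty_le U
    have hlen : U.length = edges.length := by simp [hU_def]
    omega
  obtain ⟨_, h2, h3⟩ := pvBfsA_closed U g hU (1 + pvFresh U [])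
    (op_names.length + edges.length + 1) [] [src] (by simp) (by simpa using hfuel)
    (by intro y hy; cases hy)
  have hsound := pvBfsA_sound g src (op_names.length + edges.length + 1) [] [src]
    (by intro y hy; cases hy) (by intro y hy; exact Or.inl (by simpa using hy))
  have hcomp : ∀ (k : Nat) (x y : String),
      (y = src ∨ y ∈ pvBfsA g (op_names.length + edges.length + 1) PySem.Set.empty [src]) →
      pvPath g y x k → x ∈ pvBfsA g (op_names.length + edges.length + 1) PySem.Set.empty [src] := by
    intro k
    induction k with
    | zero => intro x y _ hp; exact absurd hp (by simp [pvPath])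
    | succ m ihm =>
      intro x y hy hp
      have hstep : ∀ z ∈ g.getD y [], z ∈ pvBfsA g (op_names.length + edges.length + 1) PySem.Set.empty [src] := by
        rcases hy with rfl | hy
        · exact h2 y (Or.inr (by simp))
        · exact h3 y hy
      rcases hp with h | ⟨v, hv, hp⟩
      · exact hstep x h
      · exact ihm x v (Or.inr (hstep v hv)) hp
  have hAchar : ∀ x, x ∈ pvBfsA g (op_names.length + edges.length + 1) PySem.Set.empty [src]
      ↔ pvReach g src x := by
    intro x
    constructor
    · exact hsound x
    · rintro ⟨k, hk⟩; exact hcomp k x src (Or.inl rfl) hk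
  have hBchar := pvIter_mem g ops (PySem.Set.nodup_ofList _) hops ops.length src hsrc
  have hmem : ∀ x, x ∈ PySem.Set.discard (pvBfsA g (op_names.length + edges.length + 1) PySem.Set.empty [src]) src
      ↔ x ∈ PySem.Set.diff ((pvIterRounds g ops ops.length
          (ops.foldl (fun r u => r.insert u (PySem.Set.ofList (g.getD u []))) PySem.Dict.empty)).getD src PySem.Set.empty) [src] := by
    intro x
    rw [PySem.Set.mem_discard, PySem.Set.mem_diff, hAchar x, hBchar x]
    constructor
    · rintro ⟨hr, hne⟩
      exact ⟨pvReach_bound g ops hops src x hr, by simpa using hne⟩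
    · rintro ⟨hp, hne⟩
      exact ⟨⟨ops.length + 1, hp⟩, by simpa using hne⟩
  have hnd1 : (PySem.Set.discard (pvBfsA g (op_names.length + edges.length + 1) PySem.Set.empty [src]) src).Nodup :=
    PySem.Set.nodup_discard _ _ (pvBfsA_nodup g _ [] [src] List.nodup_nil)
  have hnd2 : (PySem.Set.diff ((pvIterRounds g ops ops.length
      (ops.foldl (fun r u => r.insert u (PySem.Set.ofList (g.getD u []))) PySem.Dict.empty)).getD src PySem.Set.empty) [src]).Nodup :=
    PySem.Set.nodup_diff _ _ (pvIter_nodup g ops (PySem.Set.nodup_ofList _) ops.length src hsrc)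
  exact PySem.List.sorted_eq_sorted_of_perm _ _ (fun x => x) (fun a b h => h)
    ((List.perm_ext_iff_of_nodup hnd1 hnd2).mpr hmem)

-- ===== VERDICT (by name: the statement is the Claim_ definition above) =====
theorem compute_reachability_py_spec : Claim_equal_compute_reachability_py := by
  intro op_names edges _ hpre
  unfold Spec_compute_reachability_py compute_reachability_py compute_reachability_py_alt
  simp only []
  apply congrArg PySem.Dict.items
  apply PySem.List.foldl_congr_mem
  intro acc src hsrc
  rw [pvPerSrc op_names edges hpre src hsrc]
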